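-- pv_equiv track=rewrite | github.com/anzulaqeel-anunzio/python-schema-visualizer | visualizer/generator.py | generate_plantuml
-- ===== SOURCE A (Python) =====
-- def generate_plantuml(schema):
--     """
--     Generates PlantUML ERD syntax from a schema dictionary.
--     """
--     lines = ["@startuml", "skinparam linetype ortho"]
--
--     relationships = []
--
--     for table_name, table_def in schema.items():
--         lines.append(f"entity \"{table_name}\" {{")
--         for col in table_def.get("columns", []):
--             pk_mark = "*" if col.get("pk") else ""
--             fk_mark = "<<" if col.get("fk") else ""
--
--             line_str = f"  {pk_mark}{col['name']} : {col['type']} {fk_mark}"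
--             lines.append(line_str)
--
--             if col.get("fk"):
--                 target = col["fk"].split(".")[0]
--                 # Default assume one-to-many
--                 relationships.append(f"\"{target}\" ||..o{{ \"{table_name}\"")
--
--         lines.append("}")
--
--     lines.extend(relationships)
--     lines.append("@enduml")
--
--     return "\n".join(lines)
-- ===== SOURCE B (Python) =====
-- def _col_line(col):
--     pk_mark = "*" if col.get("pk") else ""
--     fk_mark = "<<" if col.get("fk") else ""
--     return f"  {pk_mark}{col['name']} : {col['type']} {fk_mark}"
--
--
-- def _rel_line(table_name, col):
--     target = col["fk"].split(".")[0]
--     return f"\"{target}\" ||..o{{ \"{table_name}\""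
--
--
-- def generate_plantuml(schema):
--     """
--     Generates PlantUML ERD syntax from a schema dictionary.
--     """
--     entity_lines = [
--         line
--         for table_name, table_def in schema.items()
--         for line in [f"entity \"{table_name}\" {{"]
--         + [_col_line(col) for col in table_def.get("columns", [])]
--         + ["}"]
--     ]
--     rel_lines = [
--         _rel_line(table_name, col)
--         for table_name, table_def in schema.items()
--         for col in table_def.get("columns", [])
--         if col.get("fk")
--     ]
--     return "\n".join(
--         ["@startuml", "skinparam linetype ortho"]
--         + entity_lines
--         + rel_lines
--         + ["@enduml"]
--     )
-- ===== Notes on version B (the rewrite author's own statement) =====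
-- stated objective: alternative
-- what changed: A builds one flat line list plus a relationships side-accumulator in a single nested stateful loop; B makes two independent comprehension passes over the schema (entity lines, then fk relationship lines) and assembles the document in one join.
import Mathlib
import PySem

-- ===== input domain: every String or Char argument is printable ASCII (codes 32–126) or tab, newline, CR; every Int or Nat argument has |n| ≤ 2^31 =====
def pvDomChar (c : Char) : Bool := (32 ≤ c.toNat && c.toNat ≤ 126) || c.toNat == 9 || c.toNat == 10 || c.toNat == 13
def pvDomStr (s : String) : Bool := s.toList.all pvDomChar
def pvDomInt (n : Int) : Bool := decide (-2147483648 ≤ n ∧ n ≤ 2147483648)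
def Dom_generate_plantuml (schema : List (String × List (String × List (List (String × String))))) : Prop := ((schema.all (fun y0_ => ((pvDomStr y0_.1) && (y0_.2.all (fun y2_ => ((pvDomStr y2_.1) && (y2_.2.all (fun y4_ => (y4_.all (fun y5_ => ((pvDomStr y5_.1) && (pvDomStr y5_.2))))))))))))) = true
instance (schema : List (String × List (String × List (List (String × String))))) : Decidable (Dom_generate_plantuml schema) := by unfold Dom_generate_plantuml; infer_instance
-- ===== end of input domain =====

-- B replaces A's single stateful loop (flat line list + relationships side-accumulator) by two
-- independent passes that are joined at the end; equivalence of the two assemblies is proved on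
-- all inputs where A's Python raises no KeyError (Pre_ requires every column to carry 'name' and 'type').


-- shared primitives: association-list d.get(k) (first match) and Python string truthiness
def pvGet (d : List (String × String)) (k : String) : Option String :=
  List.lookup k d

def pvTruthy (o : Option String) : Bool :=
  match o with
  | some s => !(s == "")
  | none => false

-- ===== PORT A =====
-- body of A's inner 'for col in …' loop; state = (lines, relationships)
def pvAColStep (table_name : String) (st2 : List String × List String)
    (col : List (String × String)) : List String × List String :=
  let pk_mark := if pvTruthy (pvGet col "pk") then "*" else ""
  let fk_mark := if pvTruthy (pvGet col "fk") then "<<" else ""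
  -- col['name'] / col['type'] raise KeyError when absent; Pre_ excludes that, so getD "" is unreachable there
  let line_str := "  " ++ pk_mark ++ (pvGet col "name").getD "" ++ " : " ++ (pvGet col "type").getD "" ++ " " ++ fk_mark
  let lines2 := st2.1 ++ [line_str]
  if pvTruthy (pvGet col "fk") then
    let target := ((PySem.Str.split? ((pvGet col "fk").getD "") ".").getD []).headD ""
    (lines2, st2.2 ++ ["\"" ++ target ++ "\" ||..o{ \"" ++ table_name ++ "\""])
  else
    (lines2, st2.2)

-- body of A's outer 'for table_name, table_def in schema.items()' loop
def pvATableStep (st : List String × List String)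
    (p : String × List (String × List (List (String × String)))) : List String × List String :=
  let table_name := p.1
  let table_def := p.2
  let lines1 := st.1 ++ ["entity \"" ++ table_name ++ "\" {"]
  let cols := (List.lookup "columns" table_def).getD []
  let st2 := cols.foldl (pvAColStep table_name) (lines1, st.2)
  (st2.1 ++ ["}"], st2.2)

def generate_plantuml (schema : List (String × List (String × List (List (String × String))))) : String :=
  let st := schema.foldl pvATableStep (["@startuml", "skinparam linetype ortho"], [])
  PySem.Str.join "\n" (st.1 ++ st.2 ++ ["@enduml"])

-- ===== PORT B =====
def pvColLine (col : List (String × String)) : String :=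
  let pk_mark := if pvTruthy (pvGet col "pk") then "*" else ""
  let fk_mark := if pvTruthy (pvGet col "fk") then "<<" else ""
  "  " ++ pk_mark ++ (pvGet col "name").getD "" ++ " : " ++ (pvGet col "type").getD "" ++ " " ++ fk_mark

def pvRelLine (table_name : String) (col : List (String × String)) : String :=
  let target := ((PySem.Str.split? ((pvGet col "fk").getD "") ".").getD []).headD ""
  "\"" ++ target ++ "\" ||..o{ \"" ++ table_name ++ "\""

def generate_plantuml_alt (schema : List (String × List (String × List (List (String × String))))) : String :=
  let entity_lines := schema.flatMap (fun p =>
    ("entity \"" ++ p.1 ++ "\" {") :: (((List.lookup "columns" p.2).getD []).map pvColLine ++ ["}"]))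
  let rel_lines := schema.flatMap (fun p =>
    (((List.lookup "columns" p.2).getD []).filter (fun col => pvTruthy (pvGet col "fk"))).map (pvRelLine p.1))
  PySem.Str.join "\n" (["@startuml", "skinparam linetype ortho"] ++ entity_lines ++ rel_lines ++ ["@enduml"])

-- ===== PRECONDITION & SPEC =====
-- Pre_ excludes exactly the inputs where A's Python raises KeyError: some column dict lacks key 'name' or 'type'.
def Pre_generate_plantuml (schema : List (String × List (String × List (List (String × String))))) : Prop :=
  (schema.all (fun p => ((List.lookup "columns" p.2).getD []).all (fun col =>
    (pvGet col "name").isSome && (pvGet col "type").isSome))) = true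
instance (schema : List (String × List (String × List (List (String × String))))) : Decidable (Pre_generate_plantuml schema) := by unfold Pre_generate_plantuml; infer_instance

def pvWitness_generate_plantuml : (List (String × List (String × List (List (String × String))))) :=
  [("users", [("columns", [[("name", "id"), ("type", "int"), ("pk", "1")],
                           [("name", "team"), ("type", "int"), ("fk", "teams.id")]])]),
   ("teams", [("columns", [[("name", "id"), ("type", "int"), ("pk", "1")]])])]

def Spec_generate_plantuml (schema : List (String × List (String × List (List (String × String))))) (out : String) : Prop := out = generate_plantuml_alt schema
instance (schema : List (String × List (String × List (List (String × String))))) (out : String) : Decidable (Spec_generate_plantuml schema out) := by unfold Spec_generate_plantuml; infer_instance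

-- ===== CLAIM (what is proved, stated in full; the proofs are below) =====
def Claim_equal_generate_plantuml : Prop := ∀ (schema : List (String × List (String × List (List (String × String))))), Dom_generate_plantuml schema → Pre_generate_plantuml schema → Spec_generate_plantuml schema (generate_plantuml schema)

-- ===== LEMMAS AND PROOFS =====

-- A's inner column loop appends exactly B's column lines and B's relationship lines.
lemma pv_inner (table_name : String) (cols : List (List (String × String))) :
    ∀ (L R : List String),
      cols.foldl (pvAColStep table_name) (L, R)
      = (L ++ cols.map pvColLine,
         R ++ (cols.filter (fun col => pvTruthy (pvGet col "fk"))).map (pvRelLine table_name)) := by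
  induction cols with
  | nil => intro L R; simp
  | cons c cs ih =>
    intro L R
    rw [List.foldl_cons]
    by_cases h : pvTruthy (pvGet c "fk") = true
    · have hstep : pvAColStep table_name (L, R) c
          = (L ++ [pvColLine c], R ++ [pvRelLine table_name c]) := by
        simp [pvAColStep, pvColLine, pvRelLine, h]
      rw [hstep, ih]
      simp [h]
    · have hstep : pvAColStep table_name (L, R) c = (L ++ [pvColLine c], R) := by
        simp [pvAColStep, pvColLine, h]
      rw [hstep, ih]
      simp [h]

-- A's outer loop produces B's two flatMaps.
lemma pv_outer (schema : List (String × List (String × List (List (String × String))))) :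
    ∀ (L R : List String),
      schema.foldl pvATableStep (L, R)
      = (L ++ schema.flatMap (fun p =>
            ("entity \"" ++ p.1 ++ "\" {") :: (((List.lookup "columns" p.2).getD []).map pvColLine ++ ["}"])),
         R ++ schema.flatMap (fun p =>
            (((List.lookup "columns" p.2).getD []).filter (fun col => pvTruthy (pvGet col "fk"))).map (pvRelLine p.1))) := by
  induction schema with
  | nil => intro L R; simp
  | cons p ps ih =>
    intro L R
    rw [List.foldl_cons]
    have hstep : pvATableStep (L, R) p
        = (L ++ (("entity \"" ++ p.1 ++ "\" {") :: (((List.lookup "columns" p.2).getD []).map pvColLine ++ ["}"])),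
           R ++ (((List.lookup "columns" p.2).getD []).filter (fun col => pvTruthy (pvGet col "fk"))).map (pvRelLine p.1)) := by
      show (((((List.lookup "columns" p.2).getD []).foldl (pvAColStep p.1)
              (L ++ ["entity \"" ++ p.1 ++ "\" {"], R)).1 ++ ["}"]), _) = _
      rw [pv_inner]
      simp
    rw [hstep, ih]
    simp

-- ===== VERDICT (by name: the statement is the Claim_ definition above) =====
theorem generate_plantuml_spec : Claim_equal_generate_plantuml := by
  intro schema _ _
  show generate_plantuml schema = generate_plantuml_alt schema
  show PySem.Str.join "\n"
      ((schema.foldl pvATableStep (["@startuml", "skinparam linetype ortho"], [])).1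
        ++ (schema.foldl pvATableStep (["@startuml", "skinparam linetype ortho"], [])).2 ++ ["@enduml"]) = _
  rw [pv_outer]
  simp [generate_plantuml_alt]
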